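-- pv_equiv track=rewrite | github.com/sjmoon00/problem-solving | 프로그래머스/2/132265. 롤케이크 자르기/롤케이크 자르기.py | solution
-- ===== SOURCE A (Python) =====
-- from collections import Counter
--
-- def solution(topping):
--     answer = 0
--     N = len(topping)
--     left, right = Counter([]), Counter(topping)
--
--     for i in range(N):
--         x = topping[i]
--         left[x] += 1
--         right[x] -= 1
--
--         if right[x] == 0:
--             right.pop(x)
--
--         if len(left.values()) == len(right.values()):
--             answer += 1
--
--     return answer
-- ===== SOURCE B (Python) =====
-- def solution(topping):
--     # suffix pass: rd holds distinct-count of each suffix (built reversed, then flipped)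
--     rd = [0]
--     seen = set()
--     for x in reversed(topping):
--         seen.add(x)
--         rd.append(len(seen))
--     rd.reverse()
--     answer = 0
--     left = set()
--     for x, r in zip(topping, rd[1:]):
--         left.add(x)
--         if len(left) == r:
--             answer += 1
--     return answer
-- ===== Notes on version B (the rewrite author's own statement) =====
-- stated objective: faster
-- what changed: A keeps two Counters in sync in one pass (incrementing left, decrementing/popping right, comparing len(values())); B precomputes a suffix distinct-count table with a plain set in a reverse pass, then a forward pass with a prefix set compares against the table.
import Mathlib
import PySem

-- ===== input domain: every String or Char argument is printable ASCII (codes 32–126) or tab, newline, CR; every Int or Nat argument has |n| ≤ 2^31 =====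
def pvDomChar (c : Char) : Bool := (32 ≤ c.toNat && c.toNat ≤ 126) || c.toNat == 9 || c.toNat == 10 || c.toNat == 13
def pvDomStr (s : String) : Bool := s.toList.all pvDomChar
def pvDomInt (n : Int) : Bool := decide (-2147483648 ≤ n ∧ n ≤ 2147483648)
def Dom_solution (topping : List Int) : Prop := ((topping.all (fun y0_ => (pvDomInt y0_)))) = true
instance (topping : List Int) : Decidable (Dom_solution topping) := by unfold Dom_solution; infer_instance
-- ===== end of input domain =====

-- B replaces A's single synced-two-Counter pass by a precomputed suffix distinct-count table
-- plus a forward prefix-set pass; measured constant-factor faster (plain sets vs Counter bookkeeping).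

-- ===== PORT A =====
-- answer = 0; N = len(topping); left, right = Counter([]), Counter(topping)
-- for i in range(N): x = topping[i]; left[x] += 1; right[x] -= 1
--   if right[x] == 0: right.pop(x)
--   if len(left.values()) == len(right.values()): answer += 1
def solution (topping : List Int) : Int :=
  let N : Int := PySem.List.len topping
  let st := (PySem.List.pyRange 0 N 1).foldl
    (fun (st : Int × PySem.Dict Int Int × PySem.Dict Int Int) i =>
      let x := PySem.List.pyGetD topping i 0
      let left := st.2.1.modify x 0 (· + 1)
      let right := st.2.2.modify x 0 (· - 1)
      let right := if right.getD x 0 = 0 then right.erase x else right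
      let answer := if left.values.length = right.values.length then st.1 + 1 else st.1
      (answer, left, right))
    ((0 : Int), (PySem.Dict.empty : PySem.Dict Int Int), PySem.Dict.counter topping)
  st.1


-- ===== PORT B =====
-- rd = [0]; seen = set()
-- for x in reversed(topping): seen.add(x); rd.append(len(seen))
-- rd.reverse(); answer = 0; left = set()
-- for x, r in zip(topping, rd[1:]): left.add(x); if len(left) == r: answer += 1
def solution_alt (topping : List Int) : Int :=
  let sr := topping.reverse.foldl
    (fun (st : PySem.Set Int × List Int) x =>
      let seen := PySem.Set.add st.1 x
      (seen, st.2 ++ [PySem.Set.len seen]))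
    ((PySem.Set.empty : PySem.Set Int), [(0 : Int)])
  let rd := sr.2.reverse
  let res := (topping.zip (PySem.List.slice rd (some 1) none)).foldl
    (fun (st : Int × PySem.Set Int) p =>
      let left := PySem.Set.add st.2 p.1
      (if PySem.Set.len left = p.2 then st.1 + 1 else st.1, left))
    ((0 : Int), (PySem.Set.empty : PySem.Set Int))
  res.1


-- ===== PRECONDITION & SPEC =====
def Spec_solution (topping : List Int) (out : Int) : Prop := out = solution_alt topping
instance (topping : List Int) (out : Int) : Decidable (Spec_solution topping out) := by unfold Spec_solution; infer_instance

-- ===== CLAIM (what is proved, stated in full; the proofs are below) =====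
def Claim_equal_solution : Prop := ∀ (topping : List Int), Dom_solution topping → Spec_solution topping (solution topping)

-- ===== LEMMAS AND PROOFS =====
def dLen (xs : List Int) : Int := (PySem.Set.ofList xs).length

def cnt (s : PySem.Set Int) : List Int → Int
  | [] => 0
  | x :: rest =>
      let s' := PySem.Set.add s x
      (if PySem.Set.len s' = dLen rest then 1 else 0) + cnt s' rest

lemma dLen_congr (xs ys : List Int) (h : ∀ k, k ∈ xs ↔ k ∈ ys) :
    dLen xs = dLen ys := by
  unfold dLen
  have hp : (PySem.Set.ofList xs).Perm (PySem.Set.ofList ys) := by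
    rw [List.perm_ext_iff_of_nodup (PySem.Set.nodup_ofList xs) (PySem.Set.nodup_ofList ys)]
    intro k
    simp [PySem.Set.mem_ofList, h k]
  exact_mod_cast hp.length_eq

lemma nodup_len_eq (xs ys : List Int) (hx : xs.Nodup) (hy : ys.Nodup)
    (h : ∀ k, k ∈ xs ↔ k ∈ ys) : xs.length = ys.length :=
  ((List.perm_ext_iff_of_nodup hx hy).mpr h).length_eq

lemma keys_erase (d : PySem.Dict Int Int) (k : Int) :
    (d.erase k).keys = d.keys.filter (fun a => !(a == k)) := by
  obtain ⟨l⟩ := d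
  induction l with
  | nil => rfl
  | cons p rest ih =>
    simp only [PySem.Dict.erase, PySem.Dict.keys, List.filter_cons] at *
    by_cases hp : p.1 = k <;> simp [hp] at * <;> simpa using ih

lemma find?_filter_ne (l : List (Int × Int)) (k x : Int) (hkx : k ≠ x) :
    List.find? (fun p => p.1 == k) (l.filter (fun p => !(p.1 == x)))
      = List.find? (fun p => p.1 == k) l := by
  induction l with
  | nil => rfl
  | cons p rest ih =>
    by_cases hpx : p.1 = x
    · have hpk : (p.1 == k) = false := by simp [hpx]; omega
      simp [List.filter_cons, hpx, List.find?_cons, hpk, ih, Ne.symm hkx]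
    · by_cases hpk : p.1 = k <;>
        simp [List.filter_cons, hpx, List.find?_cons, hpk, ih, Ne.symm hkx, hkx]

lemma getD_erase (d : PySem.Dict Int Int) (k x : Int) :
    (d.erase x).getD k 0 = if k = x then 0 else d.getD k 0 := by
  by_cases hkx : k = x
  · subst hkx
    simp only [PySem.Dict.erase, PySem.Dict.getD, PySem.Dict.get?]
    have : List.find? (fun p => p.1 == k) (d.items.filter (fun p => !(p.1 == k))) = none := by
      rw [List.find?_eq_none]
      intro p hp
      simp only [List.mem_filter] at hp
      simpa using hp.2
    simp [this]
  · simp only [if_neg hkx, PySem.Dict.erase, PySem.Dict.getD, PySem.Dict.get?]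
    rw [find?_filter_ne _ _ _ hkx]

lemma values_len_eq_keys_len (d : PySem.Dict Int Int) : d.values.length = d.keys.length := by
  simp [PySem.Dict.values, PySem.Dict.keys]

lemma A_loop (suf : List Int) (a : Int) (left right : PySem.Dict Int Int) (s : PySem.Set Int)
    (hl : left.keys = s)
    (hr2 : right.keys.Nodup)
    (hr3 : ∀ k, k ∈ right.keys ↔ k ∈ suf)
    (hr1 : ∀ k, right.getD k 0 = suf.count k) :
    (suf.foldl
      (fun (st : Int × PySem.Dict Int Int × PySem.Dict Int Int) x =>
        let left := st.2.1.modify x 0 (· + 1)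
        let right := st.2.2.modify x 0 (· - 1)
        let right := if right.getD x 0 = 0 then right.erase x else right
        let answer := if left.values.length = right.values.length then st.1 + 1 else st.1
        (answer, left, right))
      (a, left, right)).1 = a + cnt s suf := by
  induction suf generalizing a left right s with
  | nil => simp [cnt]
  | cons x rest ih =>
    simp only [List.foldl_cons]
    -- names for the one step
    set left' := left.modify x 0 (· + 1) with hleft'
    set right1 := right.modify x 0 (· - 1) with hright1
    set right' := if right1.getD x 0 = 0 then right1.erase x else right1 with hright'
    set a' := if left'.values.length = right'.values.length then a + 1 else a with ha'
    -- left' keys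
    have hlk : left'.keys = PySem.Set.add s x := by
      rw [hleft', PySem.Dict.keys_modify]
      by_cases hc : left.contains x = true
      · rw [PySem.Dict.keys_insert_of_contains _ _ hc, hl]
        have hxs : x ∈ s := by rw [← hl]; exact (PySem.Dict.contains_iff_mem_keys _ _).mp hc
        simp [PySem.Set.add, hxs]
      · have hc' : left.contains x = false := by simpa using hc
        rw [PySem.Dict.keys_insert_of_not_contains _ _ hc', hl]
        have hxs : x ∉ s := by
          rw [← hl]; intro hm
          exact hc ((PySem.Dict.contains_iff_mem_keys _ _).mpr hm)
        simp [PySem.Set.add, hxs]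
    -- x is a key of right
    have hcx : right.contains x = true :=
      (PySem.Dict.contains_iff_mem_keys _ _).mpr ((hr3 x).mpr (List.mem_cons_self))
    have hk1 : right1.keys = right.keys := by
      rw [hright1, PySem.Dict.keys_modify, PySem.Dict.keys_insert_of_contains _ _ hcx]
    have hr1' : ∀ k, right1.getD k 0 = if k = x then (rest.count x : Int) else ((x :: rest).count k : Int) := by
      intro k
      rw [hright1, PySem.Dict.getD_modify]
      by_cases hk : k = x
      · subst hk; rw [if_pos rfl, if_pos rfl, hr1]
        simp [List.count_cons_self]
      · rw [if_neg hk, if_neg hk, hr1]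
    -- invariants for right'
    have hr2' : right'.keys.Nodup := by
      rw [hright']
      split
      · rw [keys_erase]; exact (hk1 ▸ hr2).filter _
      · exact hk1 ▸ hr2
    have hr3' : ∀ k, k ∈ right'.keys ↔ k ∈ rest := by
      intro k
      rw [hright']
      split
      · next h0 =>
        have hxr : x ∉ rest := by
          rw [hr1'] at h0; simp at h0
          simpa [List.count_eq_zero] using h0
        rw [keys_erase]
        simp only [List.mem_filter, hk1, hr3, Bool.not_eq_eq_eq_not, Bool.not_true, beq_eq_false_iff_ne]
        constructor
        · rintro ⟨hm, hne⟩
          rcases List.mem_cons.mp hm with h | h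
          · exact absurd h hne
          · exact h
        · intro hm
          exact ⟨List.mem_cons_of_mem _ hm, fun he => hxr (he ▸ hm)⟩
      · next h0 =>
        have hxr : x ∈ rest := by
          rw [hr1'] at h0; simp at h0
          exact List.count_pos_iff.mp (by omega)
        rw [hk1, hr3]
        constructor
        · intro hm
          rcases List.mem_cons.mp hm with h | h
          · exact h ▸ hxr
          · exact h
        · exact List.mem_cons_of_mem _
    have hr1'' : ∀ k, right'.getD k 0 = (rest.count k : Int) := by
      intro k
      rw [hright']
      split
      · next h0 =>
        have hxr : x ∉ rest := by
          rw [hr1'] at h0; simp at h0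
          simpa [List.count_eq_zero] using h0
        rw [getD_erase]
        by_cases hk : k = x
        · subst hk; simp [List.count_eq_zero.mpr hxr]
        · rw [if_neg hk, hr1', if_neg hk]
          simp [List.count_cons, hk, (Ne.symm hk : ¬ x = k)]
      · rw [hr1']
        by_cases hk : k = x
        · subst hk; simp
        · rw [if_neg hk]
          simp [List.count_cons, hk, (Ne.symm hk : ¬ x = k)]
    -- the counting condition is the spec's condition
    have hcond : (left'.values.length = right'.values.length)
        ↔ (PySem.Set.len (PySem.Set.add s x) = dLen rest) := by
      rw [values_len_eq_keys_len, values_len_eq_keys_len, hlk]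
      have hrl : right'.keys.length = (PySem.Set.ofList rest).length :=
        nodup_len_eq _ _ hr2' (PySem.Set.nodup_ofList rest)
          (fun k => (hr3' k).trans (PySem.Set.mem_ofList rest k).symm)
      rw [hrl]
      unfold dLen PySem.Set.len
      exact_mod_cast Iff.rfl.symm.symm
    rw [ih a' left' right' (PySem.Set.add s x) hlk hr2' hr3' hr1'']
    show a' + cnt (PySem.Set.add s x) rest = a + cnt s (x :: rest)
    simp only [cnt]
    rw [ha']
    split_ifs with h1 h2 h2
    · omega
    · exact absurd (hcond.mp h1) h2
    · exact absurd (hcond.mpr h2) h1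
    · omega

def rdSpec : List Int → List Int
  | [] => [0]
  | x :: rest => dLen (x :: rest) :: rdSpec rest

lemma ofList_append_singleton (xs : List Int) (x : Int) :
    PySem.Set.ofList (xs ++ [x]) = PySem.Set.add (PySem.Set.ofList xs) x := by
  simp [PySem.Set.ofList_eq_foldl, List.foldl_append]

lemma rdSpec_head_tail (l : List Int) : rdSpec l = dLen l :: (rdSpec l).tail := by
  cases l with
  | nil => simp [rdSpec, dLen]
  | cons x rest => rfl

lemma B_rev (l : List Int) :
    l.reverse.foldl
      (fun (st : PySem.Set Int × List Int) x =>
        let seen := PySem.Set.add st.1 x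
        (seen, st.2 ++ [PySem.Set.len seen]))
      ((PySem.Set.empty : PySem.Set Int), [(0 : Int)])
    = (PySem.Set.ofList l.reverse, (rdSpec l).reverse) := by
  induction l with
  | nil => rfl
  | cons x rest ih =>
    simp only [List.reverse_cons, List.foldl_append, ih, List.foldl_cons, List.foldl_nil]
    rw [← ofList_append_singleton]
    refine Prod.ext rfl ?_
    show (rdSpec rest).reverse ++ [PySem.Set.len (PySem.Set.ofList (rest.reverse ++ [x]))]
        = (rdSpec (x :: rest)).reverse
    have hlen : PySem.Set.len (PySem.Set.ofList (rest.reverse ++ [x])) = dLen (x :: rest) := by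
      unfold PySem.Set.len
      exact dLen_congr _ _ (by intro k; simp [or_comm])
    rw [hlen]
    simp [rdSpec]

lemma B_fwd (l : List Int) (a : Int) (s : PySem.Set Int) :
    ((l.zip ((rdSpec l).tail)).foldl
      (fun (st : Int × PySem.Set Int) p =>
        let left := PySem.Set.add st.2 p.1
        (if PySem.Set.len left = p.2 then st.1 + 1 else st.1, left))
      (a, s)).1 = a + cnt s l := by
  induction l generalizing a s with
  | nil => simp [cnt]
  | cons x rest ih =>
    have hz : (x :: rest).zip ((rdSpec (x :: rest)).tail)
        = (x, dLen rest) :: rest.zip ((rdSpec rest).tail) := by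
      show (x :: rest).zip (rdSpec rest) = _
      rw [rdSpec_head_tail rest]
      rfl
    rw [hz, List.foldl_cons, ih]
    show (if PySem.Set.len (s.add x) = dLen rest then a + 1 else a) + cnt (s.add x) rest
        = a + cnt s (x :: rest)
    simp only [cnt]
    split_ifs <;> omega


-- ===== VERDICT (by name: the statement is the Claim_ definition above) =====
theorem solution_spec : Claim_equal_solution := by
  intro t _
  show solution t = solution_alt t
  have hA : solution t = 0 + cnt PySem.Set.empty t := by
    show ((PySem.List.pyRange 0 (PySem.List.len t) 1).foldl
      (fun (st : Int × PySem.Dict Int Int × PySem.Dict Int Int) i =>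
        let x := PySem.List.pyGetD t i 0
        let left := st.2.1.modify x 0 (· + 1)
        let right := st.2.2.modify x 0 (· - 1)
        let right := if right.getD x 0 = 0 then right.erase x else right
        let answer := if left.values.length = right.values.length then st.1 + 1 else st.1
        (answer, left, right))
      ((0 : Int), (PySem.Dict.empty : PySem.Dict Int Int), PySem.Dict.counter t)).1
      = 0 + cnt PySem.Set.empty t
    have key := PySem.List.foldl_pyRange_pyGetD t 0
      (fun (st : Int × PySem.Dict Int Int × PySem.Dict Int Int) x =>
        let left := st.2.1.modify x 0 (· + 1)
        let right := st.2.2.modify x 0 (· - 1)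
        let right := if right.getD x 0 = 0 then right.erase x else right
        let answer := if left.values.length = right.values.length then st.1 + 1 else st.1
        (answer, left, right))
      ((0 : Int), (PySem.Dict.empty : PySem.Dict Int Int), PySem.Dict.counter t)
      (le_refl (0 : Int))
    rw [show ((0 : Int).toNat) = 0 from rfl, List.drop_zero] at key
    rw [key]
    exact A_loop t 0 _ _ PySem.Set.empty rfl
      (by rw [PySem.Dict.keys_counter]; exact PySem.Set.nodup_ofList t)
      (by intro k; rw [PySem.Dict.keys_counter]; exact PySem.Set.mem_ofList t k)
      (by intro k; exact PySem.Dict.getD_counter t k)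
  have hB : solution_alt t = 0 + cnt PySem.Set.empty t := by
    show ((t.zip (PySem.List.slice
        ((t.reverse.foldl
          (fun (st : PySem.Set Int × List Int) x =>
            let seen := PySem.Set.add st.1 x
            (seen, st.2 ++ [PySem.Set.len seen]))
          ((PySem.Set.empty : PySem.Set Int), [(0 : Int)])).2.reverse)
        (some 1) none)).foldl
      (fun (st : Int × PySem.Set Int) p =>
        let left := PySem.Set.add st.2 p.1
        (if PySem.Set.len left = p.2 then st.1 + 1 else st.1, left))
      ((0 : Int), (PySem.Set.empty : PySem.Set Int))).1
      = 0 + cnt PySem.Set.empty t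
    rw [B_rev t]
    rw [List.reverse_reverse, PySem.List.slice_from_one]
    exact B_fwd t 0 PySem.Set.empty
  rw [hA, hB]
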